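-- pv_equiv track=rewrite | github.com/Vif5050/Roulette-Bot | roulette_bot.py | get_sixteen_score
-- ===== SOURCE A (Python) =====
-- SIXTEEN_LIST = [0, 1, 2, 3, 10, 11, 12, 13, 20, 21, 22, 23, 30, 31, 32, 33]
--
-- def get_sixteen_score(recent):
--     """Check if two 16-list numbers appear with >=3 numbers between them"""
--     last_10 = recent[:10]
--     for i in range(len(last_10)):
--         if last_10[i] in SIXTEEN_LIST:
--             for j in range(i+4, min(i+7, len(last_10))):
--                 if last_10[j] in SIXTEEN_LIST:
--                     return 10 - i  # Higher score for more recent hits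
--     return 0
-- ===== SOURCE B (Python) =====
-- SIXTEEN_LIST = [0, 1, 2, 3, 10, 11, 12, 13, 20, 21, 22, 23, 30, 31, 32, 33]
--
-- def get_sixteen_score(recent):
--     """Check if two 16-list numbers appear with >=3 numbers between them"""
--     last_10 = recent[:10]
--     sixteen = set(SIXTEEN_LIST)
--     # pair the window with its shifted copies: element i meets element i+d, d in 4..6
--     valid = [i
--              for d in (4, 5, 6)
--              for i, (x, y) in enumerate(zip(last_10, last_10[d:]))
--              if x in sixteen and y in sixteen]
--     return 10 - min(valid) if valid else 0
-- ===== Notes on version B (the rewrite author's own statement) =====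
-- stated objective: alternative
-- what changed: B replaces A's nested first-match look-ahead scan by a shifted-zip formulation: it zips the window with its copies shifted by 4, 5 and 6, collects every index whose pair is two sixteen-list hits, and returns 10 minus the minimum such index (0 if none).
import Mathlib
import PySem

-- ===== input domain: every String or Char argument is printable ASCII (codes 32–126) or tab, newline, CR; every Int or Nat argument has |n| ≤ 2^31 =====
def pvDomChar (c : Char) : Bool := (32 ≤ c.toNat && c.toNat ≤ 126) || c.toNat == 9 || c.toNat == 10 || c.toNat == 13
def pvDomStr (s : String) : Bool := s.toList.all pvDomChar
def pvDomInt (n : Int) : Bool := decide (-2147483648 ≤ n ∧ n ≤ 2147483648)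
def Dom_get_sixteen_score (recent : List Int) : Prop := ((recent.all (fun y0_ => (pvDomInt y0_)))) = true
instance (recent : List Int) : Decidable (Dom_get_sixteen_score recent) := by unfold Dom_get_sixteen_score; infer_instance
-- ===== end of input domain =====

-- B replaces A's nested first-match look-ahead scan by a shifted-zip formulation:
-- it collects every index paired (at shift 4, 5 or 6) with another hit and takes 10 - min (alternative decomposition).


-- ===== PORT A =====
def SIXTEEN_LIST : List Int := [0, 1, 2, 3, 10, 11, 12, 13, 20, 21, 22, 23, 30, 31, 32, 33]

-- inner loop: for j in range(i+4, min(i+7, len(last_10))): if last_10[j] in SIXTEEN_LIST: return 10-i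
def innerA (last10 : List Int) (i : Nat) : List Nat → Option Int
  | [] => none
  | j :: js =>
    if SIXTEEN_LIST.contains (last10.getD j 0) then some (10 - (i : Int))
    else innerA last10 i js

-- outer loop: for i in range(len(last_10)): …
def loopA (last10 : List Int) : List Nat → Int
  | [] => 0
  | i :: is =>
    if SIXTEEN_LIST.contains (last10.getD i 0) then
      match innerA last10 i (List.range' (i + 4) (min (i + 7) last10.length - (i + 4))) with
      | some r => r
      | none => loopA last10 is
    else loopA last10 is

def get_sixteen_score (recent : List Int) : Int :=
  let last10 := PySem.List.slice recent none (some 10)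
  loopA last10 (List.range last10.length)

-- ===== PORT B =====
-- valid = [i for d in (4,5,6) for i,(x,y) in enumerate(zip(last_10, last_10[d:])) if x in sixteen and y in sixteen]
def validB (last10 : List Int) : List Int :=
  ([4, 5, 6] : List Nat).flatMap (fun (d : Nat) =>
    ((PySem.List.enumerate (last10.zip (PySem.List.slice last10 (some ((d : Nat) : Int)) none))).filter
      (fun p => SIXTEEN_LIST.contains p.2.1 && SIXTEEN_LIST.contains p.2.2)).map (·.1))

-- return 10 - min(valid) if valid else 0
def get_sixteen_score_alt (recent : List Int) : Int :=
  let last10 := PySem.List.slice recent none (some 10)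
  let valid := validB last10
  if valid.isEmpty then 0
  else 10 - (PySem.List.min? valid (fun x => x)).getD 0

-- ===== PRECONDITION & SPEC =====
def Spec_get_sixteen_score (recent : List Int) (out : Int) : Prop := out = get_sixteen_score_alt recent
instance (recent : List Int) (out : Int) : Decidable (Spec_get_sixteen_score recent out) := by unfold Spec_get_sixteen_score; infer_instance

-- ===== CLAIM (what is proved, stated in full; the proofs are below) =====
def Claim_equal_get_sixteen_score : Prop := ∀ (recent : List Int), Dom_get_sixteen_score recent → Spec_get_sixteen_score recent (get_sixteen_score recent)

-- ===== LEMMAS AND PROOFS =====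

-- A's success condition at index i (used only in the proofs)
def goodA (last10 : List Int) (i : Nat) : Bool :=
  SIXTEEN_LIST.contains (last10.getD i 0) &&
    (List.range' (i + 4) (min (i + 7) last10.length - (i + 4))).any
      (fun j => SIXTEEN_LIST.contains (last10.getD j 0))

theorem innerA_eq (last10 : List Int) (i : Nat) (js : List Nat) :
    innerA last10 i js =
      (if js.any (fun j => SIXTEEN_LIST.contains (last10.getD j 0)) then some (10 - (i : Int)) else none) := by
  induction js with
  | nil => rfl
  | cons j js ih =>
    simp only [innerA, ih, List.any_cons, Bool.or_eq_true]
    by_cases h : last10[j]?.getD 0 ∈ SIXTEEN_LIST <;> simp [h]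

-- A's loop is a first-match search for goodA
theorem loopA_eq_find (last10 : List Int) (l : List Nat) :
    loopA last10 l =
      (match l.find? (goodA last10) with
       | some i => 10 - (i : Int)
       | none => 0) := by
  induction l with
  | nil => rfl
  | cons i is ih =>
    simp only [loopA, innerA_eq, List.find?_cons]
    by_cases h1 : SIXTEEN_LIST.contains (last10.getD i 0) = true <;>
      by_cases h2 : ((List.range' (i + 4) (min (i + 7) last10.length - (i + 4))).any
          (fun j => SIXTEEN_LIST.contains (last10.getD j 0))) = true
    · have hg : goodA last10 i = true := by simp only [goodA, h1, h2, Bool.and_self]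
      rw [hg, if_pos h1, if_pos h2]
    · have hg : goodA last10 i = false := by
        simp only [goodA, h1, Bool.true_and]; simpa using h2
      rw [hg, if_pos h1, if_neg h2]; simpa using ih
    · have hg : goodA last10 i = false := by simp only [goodA, h1, Bool.false_and]
      rw [hg, if_neg h1]; exact ih
    · have hg : goodA last10 i = false := by simp only [goodA, h1, Bool.false_and]
      rw [hg, if_neg h1]; exact ih

-- goodA in closed form: some shift d ∈ {4,5,6} lands on a second in-range hit
theorem goodA_iff (last10 : List Int) (i : Nat) :
    goodA last10 i = true ↔
      SIXTEEN_LIST.contains (last10.getD i 0) = true ∧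
        ∃ d, (d = 4 ∨ d = 5 ∨ d = 6) ∧ i + d < last10.length ∧
          SIXTEEN_LIST.contains (last10.getD (i + d) 0) = true := by
  simp only [goodA, Bool.and_eq_true, List.any_eq_true, List.mem_range'_1]
  constructor
  · rintro ⟨h1, j, ⟨hj1, hj2⟩, hj3⟩
    exact ⟨h1, j - i, by omega, by omega, by rwa [show i + (j - i) = j by omega]⟩
  · rintro ⟨h1, d, hd, hlt, hp⟩
    exact ⟨h1, i + d, ⟨by omega, by omega⟩, hp⟩

-- membership in B's valid list matches goodA
theorem mem_validB_part (last10 : List Int) (x : Int) (d : Nat) :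
    (x ∈ ((PySem.List.enumerate (last10.zip (PySem.List.slice last10 (some ((d : Nat) : Int)) none))).filter
        (fun p => SIXTEEN_LIST.contains p.2.1 && SIXTEEN_LIST.contains p.2.2)).map (·.1)) ↔
      ∃ k : Nat, k + d < last10.length ∧
        SIXTEEN_LIST.contains (last10.getD k 0) = true ∧
        SIXTEEN_LIST.contains (last10.getD (k + d) 0) = true ∧ x = (k : Int) := by
  rw [PySem.List.slice_from_natCast]
  simp only [List.mem_map, List.mem_filter, PySem.List.mem_enumerate_iff]
  constructor
  · rintro ⟨p, ⟨⟨k, hk, rfl⟩, hq⟩, rfl⟩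
    have hklen : k + d < last10.length := by
      simp only [List.length_zip, List.length_drop] at hk; omega
    have hk1 : k < last10.length := by omega
    simp only [List.getElem_zip, List.getElem_drop, Bool.and_eq_true] at hq
    refine ⟨k, hklen, ?_, ?_, by simp⟩
    · simpa [List.getD, List.getElem?_eq_getElem hk1] using hq.1
    · have h : last10.getD (k + d) 0 = last10[d + k]'(by omega) := by
        rw [show k + d = d + k by omega]
        simp [List.getD, List.getElem?_eq_getElem (show d + k < last10.length by omega)]
      rw [h]; exact hq.2
  · rintro ⟨k, hlt, hp1, hp2, rfl⟩
    have hk1 : k < last10.length := by omega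
    have hklen : k < (last10.zip (last10.drop d)).length := by
      simp only [List.length_zip, List.length_drop]; omega
    refine ⟨((k : Int), (last10[k], last10[d + k]'(by omega))), ⟨⟨k, hklen, ?_⟩, ?_⟩, by simp⟩
    · simp [List.getElem_zip, List.getElem_drop]
    · simp only [Bool.and_eq_true]
      refine ⟨by simpa [List.getD, List.getElem?_eq_getElem hk1] using hp1, ?_⟩
      have h : last10.getD (k + d) 0 = last10[d + k]'(by omega) := by
        rw [show k + d = d + k by omega]
        simp [List.getD, List.getElem?_eq_getElem (show d + k < last10.length by omega)]
      rw [← h]; exact hp2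

theorem mem_validB (last10 : List Int) (x : Int) :
    x ∈ validB last10 ↔ ∃ i : Nat, i < last10.length ∧ goodA last10 i = true ∧ x = (i : Int) := by
  constructor
  · intro hx
    rw [validB, List.mem_flatMap] at hx
    obtain ⟨d, hd, hxd⟩ := hx
    rw [mem_validB_part] at hxd
    obtain ⟨k, hlt, hp1, hp2, rfl⟩ := hxd
    have hdv : d = 4 ∨ d = 5 ∨ d = 6 := by simpa using hd
    exact ⟨k, by omega, (goodA_iff last10 k).mpr ⟨hp1, d, hdv, by omega, by rwa [show k + d = k + d from rfl]⟩, rfl⟩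
  · rintro ⟨i, hi, hg, rfl⟩
    obtain ⟨h1, d, hdv, hlt, h2⟩ := (goodA_iff last10 i).mp hg
    rw [validB, List.mem_flatMap]
    exact ⟨d, by rcases hdv with h|h|h <;> simp [h], (mem_validB_part last10 _ d).mpr ⟨i, by omega, h1, h2, rfl⟩⟩

-- find? on range n: characterisation
theorem find?_range_some {n i : Nat} {q : Nat → Bool}
    (h : (List.range n).find? q = some i) :
    q i = true ∧ i < n ∧ ∀ j < i, q j = false := by
  rw [List.find?_eq_some_iff_getElem] at h
  obtain ⟨hqi, k, hk, hki, hleast⟩ := h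
  have hkr : (List.range n)[k] = k := List.getElem_range ..
  rw [hkr] at hki
  subst hki
  refine ⟨hqi, by simpa using hk, ?_⟩
  intro j hj
  have := hleast j hj
  rw [List.getElem_range] at this
  simpa using this

theorem find?_range_none {n : Nat} {q : Nat → Bool}
    (h : (List.range n).find? q = none) : ∀ j < n, q j = false := by
  intro j hj
  simpa using List.find?_eq_none.mp h j (List.mem_range.mpr hj)

-- ===== VERDICT (by name: the statement is the Claim_ definition above) =====
theorem get_sixteen_score_spec : Claim_equal_get_sixteen_score := by
  intro recent _
  unfold Spec_get_sixteen_score get_sixteen_score get_sixteen_score_alt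
  simp only []
  set last10 := PySem.List.slice recent none (some 10) with hl
  rw [loopA_eq_find]
  rcases hfind : (List.range last10.length).find? (goodA last10) with _ | i
  · -- no good index: valid is empty
    have hempty : validB last10 = [] := by
      rw [List.eq_nil_iff_forall_not_mem]
      intro x hx
      obtain ⟨i, hi, hg, rfl⟩ := (mem_validB last10 x).mp hx
      have := find?_range_none hfind i hi
      rw [this] at hg; exact absurd hg (by simp)
    simp [hempty]
  · obtain ⟨hgi, hin, hleast⟩ := find?_range_some hfind
    have hmem : (i : Int) ∈ validB last10 := (mem_validB last10 _).mpr ⟨i, hin, hgi, rfl⟩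
    have hne : ¬ (validB last10).isEmpty := by
      simp only [List.isEmpty_iff]; intro h; rw [h] at hmem; exact absurd hmem (by simp)
    rcases hmin : PySem.List.min? (validB last10) (fun x => x) with _ | m
    · rw [PySem.List.min?_eq_none_iff] at hmin
      rw [hmin] at hmem; exact absurd hmem (by simp)
    · have hmmem := PySem.List.min?_mem hmin
      obtain ⟨k, hk, hgk, rfl⟩ := (mem_validB last10 _).mp hmmem
      have h1 : (k : Int) ≤ (i : Int) := PySem.List.min?_isMin hmin _ hmem
      have h2 : i ≤ k := by
        by_contra h
        have := hleast k (by omega)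
        rw [this] at hgk; exact absurd hgk (by simp)
      have : k = i := by omega
      subst this
      simp [hne, hmin]
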